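-- pv_equiv track=rewrite | github.com/Sripriyaa777/Amfoss-Tasks | Task-03/Python/Sub-Task4.py | pyramid
-- ===== SOURCE A (Python) =====
-- def pyramid(rows):
--     pattern = []
--
--     for i in range(rows):
--         line = " " * (rows - i - 1) + "* " * (i + 1)
--         pattern.append(line)
--     for j in range(rows - 1, 0, -1):
--         line = " " * (rows - j) + "* " * j
--         pattern.append(line)
--     return pattern
-- ===== SOURCE B (Python) =====
-- def pyramid(rows):
--     # Single pass over the 2*rows-1 lines: line k has rows - abs(rows-1-k) stars.
--     return [" " * abs(rows - 1 - k) + "* " * (rows - abs(rows - 1 - k))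
--             for k in range(2 * rows - 1)]
-- ===== Notes on version B (the rewrite author's own statement) =====
-- stated objective: simpler
-- what changed: Replaces A's two sequential up/down loops by a single comprehension over all line indices, computing each line's star count in closed form via an absolute-value formula.
import Mathlib
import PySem

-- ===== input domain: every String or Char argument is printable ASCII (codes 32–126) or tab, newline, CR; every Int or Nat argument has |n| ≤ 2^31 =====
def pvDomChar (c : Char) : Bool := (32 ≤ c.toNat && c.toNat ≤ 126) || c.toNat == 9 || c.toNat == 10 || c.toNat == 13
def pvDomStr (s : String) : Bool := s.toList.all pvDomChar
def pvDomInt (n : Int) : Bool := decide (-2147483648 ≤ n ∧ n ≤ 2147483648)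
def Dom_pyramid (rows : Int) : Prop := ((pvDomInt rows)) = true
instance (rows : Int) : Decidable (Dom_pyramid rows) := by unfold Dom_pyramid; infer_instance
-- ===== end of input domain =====

-- B replaces A's two sequential up/down loops by one map over all 2*rows-1 lines with a closed-form star count (simpler decomposition, same cost).


-- Python 's * n' on strings (exact: n ≤ 0 gives ""): shared primitive helper, not part of either algorithm.
def strMul (s : String) (n : Int) : String := String.ofList (PySem.List.pyRepeat s.toList n)
-- Python 'a + b' on strings, via lists so the kernel can reduce it.
def strAdd (a b : String) : String := String.ofList (a.toList ++ b.toList)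

-- ===== PORT A =====
def pyramid (rows : Int) : List String :=
  let pattern : List String := []
  let pattern := (PySem.List.pyRange 0 rows 1).foldl
    (fun pat i => pat ++ [strAdd (strMul " " (rows - i - 1)) (strMul "* " (i + 1))]) pattern
  (PySem.List.pyRange (rows - 1) 0 (-1)).foldl
    (fun pat j => pat ++ [strAdd (strMul " " (rows - j)) (strMul "* " j)]) pattern

-- ===== PORT B =====
def pyramid_alt (rows : Int) : List String :=
  (PySem.List.pyRange 0 (2 * rows - 1) 1).map
    (fun k => strAdd (strMul " " |rows - 1 - k|) (strMul "* " (rows - |rows - 1 - k|)))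

-- ===== PRECONDITION & SPEC =====
def Spec_pyramid (rows : Int) (out : List String) : Prop := out = pyramid_alt rows
instance (rows : Int) (out : List String) : Decidable (Spec_pyramid rows out) := by unfold Spec_pyramid; infer_instance

-- ===== CLAIM (what is proved, stated in full; the proofs are below) =====
def Claim_equal_pyramid : Prop := ∀ (rows : Int), Dom_pyramid rows → Spec_pyramid rows (pyramid rows)

-- ===== LEMMAS AND PROOFS =====

theorem pyramid_eq_maps (rows : Int) :
    pyramid rows =
      (PySem.List.pyRange 0 rows 1).map
        (fun i => strAdd (strMul " " (rows - i - 1)) (strMul "* " (i + 1))) ++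
      (PySem.List.pyRange (rows - 1) 0 (-1)).map
        (fun j => strAdd (strMul " " (rows - j)) (strMul "* " j)) := by
  simp only [pyramid]
  rw [PySem.List.foldl_append_singleton_eq_map, PySem.List.foldl_append_singleton_eq_map]
  simp

set_option maxHeartbeats 1000000 in
theorem pyramid_alt_eq (rows : Int) : pyramid_alt rows = pyramid rows := by
  rw [pyramid_eq_maps]
  rcases (by omega : rows ≤ 0 ∨ 0 < rows) with h | h
  · rw [pyramid_alt, PySem.List.pyRange_one_eq_nil (by omega),
      PySem.List.pyRange_one_eq_nil (by omega),
      PySem.List.pyRange_neg_one_eq_nil (by omega)]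
    simp
  · rw [pyramid_alt,
      PySem.List.pyRange_one_append 0 rows (2 * rows - 1) (by omega) (by omega),
      List.map_append]
    congr 1
    · refine List.map_congr_left (fun k hk => ?_)
      rw [PySem.List.mem_pyRange_one] at hk
      have : |rows - 1 - k| = rows - 1 - k := abs_of_nonneg (by omega)
      rw [this]
      congr 1 <;> congr 1 <;> omega
    · rw [PySem.List.pyRange_one rows (2 * rows - 1),
        PySem.List.pyRange_neg_one (rows - 1) 0, List.map_map, List.map_map]
      have hlen : (2 * rows - 1 - rows).toNat = (rows - 1 - 0).toNat := by omega
      rw [hlen]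
      refine List.map_congr_left (fun t ht => ?_)
      rw [List.mem_range] at ht
      have ht' : (t : Int) < rows - 1 := by omega
      simp only [Function.comp]
      have : |rows - 1 - (rows + (t : Int))| = (t : Int) + 1 := by
        rw [abs_of_nonpos (by omega)]; omega
      rw [this]
      congr 1 <;> congr 1 <;> omega

-- ===== VERDICT (by name: the statement is the Claim_ definition above) =====
theorem pyramid_spec : Claim_equal_pyramid := by
  intro rows _
  unfold Spec_pyramid
  exact (pyramid_alt_eq rows).symm
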